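-- pv_equiv track=rewrite | github.com/diixo/jeweler-content | nlp.py | get_ngrams_freqDist
-- ===== SOURCE A (Python) =====
-- def get_ngrams_freqDist(ngramList, n):
--     ngram_freq_dict = {}
--     for ngram in ngramList:
--         if ngram in ngram_freq_dict:
--             ngram_freq_dict[ngram] += 1
--         else:
--             ngram_freq_dict[ngram] = 1
--     return ngram_freq_dict
-- ===== SOURCE B (Python) =====
-- def get_ngrams_freqDist(ngramList, n):
--     result = {}
--     rest = list(ngramList)
--     while rest:
--         head = rest[0]
--         rest2 = [g for g in rest if g != head]
--         result[head] = len(rest) - len(rest2)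
--         rest = rest2
--     return result
-- ===== Notes on version B (the rewrite author's own statement) =====
-- stated objective: alternative
-- what changed: Replaces A's single pass that increments a per-key dict counter with a partition-and-discard loop: repeatedly take the first remaining ngram, compute its count as the length drop after filtering out all its occurrences, and continue on the filtered remainder; it trades A's O(n) single pass for O(u*n) repeated filtering.
import Mathlib
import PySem

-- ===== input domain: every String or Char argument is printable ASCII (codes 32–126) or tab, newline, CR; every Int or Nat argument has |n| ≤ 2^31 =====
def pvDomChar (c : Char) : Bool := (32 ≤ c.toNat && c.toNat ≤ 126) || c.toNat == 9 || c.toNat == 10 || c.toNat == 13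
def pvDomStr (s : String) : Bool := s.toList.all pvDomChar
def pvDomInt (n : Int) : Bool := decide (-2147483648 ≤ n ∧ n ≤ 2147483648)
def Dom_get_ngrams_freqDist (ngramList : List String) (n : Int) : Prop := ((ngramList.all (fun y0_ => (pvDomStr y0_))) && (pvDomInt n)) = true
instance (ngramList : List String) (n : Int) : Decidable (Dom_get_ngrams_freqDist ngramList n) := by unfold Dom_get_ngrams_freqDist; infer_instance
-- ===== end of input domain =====

-- B replaces A's single increment-a-dict-counter pass by a partition-and-discard loop (count the first remaining ngram by the length drop after filtering it out, continue on the remainder): an alternative decomposition, not faster.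

-- ===== PORT A =====
-- Literal port of A: one pass, a dict updated in place (d[x] += 1 / d[x] = 1), returned as its items.
def get_ngrams_freqDist (ngramList : List String) (n : Int) : List (String × Int) :=
  (ngramList.foldl
    (fun d ngram =>
      if d.contains ngram then d.insert ngram (d.getD ngram 0 + 1)
      else d.insert ngram 1)
    PySem.Dict.empty).items

-- ===== PORT B =====
-- Port of B's while loop: state = (result dict, remaining list); each step takes the first
-- remaining element, filters out all its occurrences, and records len(rest) - len(rest2).
def pvFreqLoop (result : PySem.Dict String Int) (rest : List String) : List (String × Int) :=
  match rest with
  | [] => result.items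
  | head :: tl =>
    let rest2 := (head :: tl).filter (fun g => !(g == head))
    pvFreqLoop (result.insert head (((head :: tl).length : Int) - (rest2.length : Int))) rest2
termination_by rest.length
decreasing_by
  simp only [List.filter_cons, beq_self_eq_true, Bool.not_true, Bool.false_eq_true,
    if_false, List.length_cons]
  have := List.length_filter_le (fun g => !(g == head)) tl
  omega

def get_ngrams_freqDist_alt (ngramList : List String) (n : Int) : List (String × Int) :=
  pvFreqLoop PySem.Dict.empty ngramList

-- ===== PRECONDITION & SPEC =====
def Spec_get_ngrams_freqDist (ngramList : List String) (n : Int) (out : List (String × Int)) : Prop := out = get_ngrams_freqDist_alt ngramList n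
instance (ngramList : List String) (n : Int) (out : List (String × Int)) : Decidable (Spec_get_ngrams_freqDist ngramList n out) := by unfold Spec_get_ngrams_freqDist; infer_instance

-- ===== CLAIM (what is proved, stated in full; the proofs are below) =====
def Claim_equal_get_ngrams_freqDist : Prop := ∀ (ngramList : List String) (n : Int), Dom_get_ngrams_freqDist ngramList n → Spec_get_ngrams_freqDist ngramList n (get_ngrams_freqDist ngramList n)

-- ===== LEMMAS AND PROOFS =====

-- A's step function is the standard counter step.
theorem pvStep_eq {κ : Type} [BEq κ] [LawfulBEq κ] (d : PySem.Dict κ Int) (x : κ) :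
    (if d.contains x then d.insert x (d.getD x 0 + 1) else d.insert x 1)
      = d.insert x (d.getD x 0 + 1) := by
  by_cases h : d.contains x = true
  · simp [h]
  · have hg : d.get? x = none := by
      cases e : List.find? (fun p => p.1 == x) d.items with
      | none => simp [PySem.Dict.get?, e]
      | some p =>
        exact absurd (by
          simp only [PySem.Dict.contains, List.any_eq_true]
          refine ⟨p, List.mem_of_find?_eq_some e, ?_⟩
          simpa using List.find?_some e) h
    simp [h, PySem.Dict.getD, hg]

-- set(...) commutes with filter.
theorem pvOfList_filter {α : Type} [BEq α] [LawfulBEq α] (p : α → Bool) (xs : List α) :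
    PySem.Set.ofList (xs.filter p) = (PySem.Set.ofList xs).filter p := by
  induction xs with
  | nil => simp [PySem.Set.ofList_nil]
  | cons x xs ih =>
    rw [List.filter_cons, PySem.Set.ofList_cons]
    by_cases hp : p x = true
    · rw [if_pos hp, PySem.Set.ofList_cons, ih]
      simp only [PySem.Set.discard, List.filter_cons, hp, if_true]
      rw [List.filter_comm]
    · rw [if_neg (by simp [hp]), ih]
      simp only [PySem.Set.discard, List.filter_cons, hp]
      have hfun : (fun a => p a && !(a == x)) = p := by
        funext a
        by_cases ha : a = x
        · subst ha
          simp only [Bool.not_eq_true] at hp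
          simp [hp]
        · simp [ha]
      rw [List.filter_filter, hfun]
      simp

-- count of the head equals the length drop caused by filtering it out.
theorem pvCount_eq_len_sub {α : Type} [BEq α] [LawfulBEq α] (x : α) (tl : List α) :
    (((x :: tl).length : Int) - (((x :: tl).filter (fun g => !(g == x))).length : Int))
      = ((x :: tl).count x : Int) := by
  have h1 : (tl.filter (fun g => !(g == x))).length = List.countP (fun g => !(g == x)) tl := by
    rw [List.countP_eq_length_filter]
  have h2 : tl.length = List.count x tl + List.countP (fun g => !(g == x)) tl := by
    have := List.length_eq_countP_add_countP (fun g => (g == x)) (l := tl)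
    simpa [List.count] using this
  simp only [List.filter_cons, beq_self_eq_true, Bool.not_true, List.length_cons,
    List.count_cons_self]
  push_cast
  omega

-- The loop invariant: on fresh keys, the loop appends the freq-dist of the remainder.
theorem pvFreqLoop_items_aux (N : Nat) : ∀ (rest : List String) (result : PySem.Dict String Int),
    rest.length ≤ N → (∀ g ∈ rest, result.contains g = false) →
    pvFreqLoop result rest
      = result.items ++ (PySem.Set.ofList rest).map (fun k => (k, (rest.count k : Int))) := by
  induction N with
  | zero =>
    intro rest result hlen _
    have : rest = [] := List.eq_nil_of_length_eq_zero (Nat.le_zero.mp hlen)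
    subst this
    simp [pvFreqLoop, PySem.Set.ofList_nil]
  | succ N ihN =>
    intro rest result hlen h
    match rest with
    | [] => simp [pvFreqLoop, PySem.Set.ofList_nil]
    | head :: tl =>
    rw [pvFreqLoop]
    set rest2 := (head :: tl).filter (fun g => !(g == head)) with hdef
    have hrest2 : rest2 = tl.filter (fun g => !(g == head)) := by
      simp [hdef]
    have hlen2 : rest2.length ≤ N := by
      have := List.length_filter_le (fun g => !(g == head)) tl
      rw [hrest2]
      simp only [List.length_cons] at hlen
      omega
    have ih := fun hf => ihN rest2
      (result.insert head (((head :: tl).length : Int) - (rest2.length : Int))) hlen2 hf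
    have hfresh : ∀ g ∈ rest2, (result.insert head
        (((head :: tl).length : Int) - (rest2.length : Int))).contains g = false := by
      intro g hg
      rw [hrest2] at hg
      have hmem := List.mem_of_mem_filter hg
      have hne : (g == head) = false := by
        have := List.of_mem_filter hg
        simpa using this
      rw [PySem.Dict.contains_insert, hne, Bool.false_or]
      exact h g (List.mem_cons_of_mem _ hmem)
    rw [ih hfresh]
    rw [PySem.Dict.items_insert_of_not_contains _ _ (h head List.mem_cons_self)]
    rw [List.append_assoc]
    congr 1
    rw [PySem.Set.ofList_cons]
    simp only [List.map_cons]
    have hhead : ((head :: tl).length : Int) - (rest2.length : Int)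
        = ((head :: tl).count head : Int) := by
      rw [hdef]; exact pvCount_eq_len_sub head tl
    rw [hhead]
    congr 1
    -- tails: same key set, same counts
    have hset : PySem.Set.ofList rest2 = (PySem.Set.ofList tl).discard head := by
      rw [hrest2, pvOfList_filter]; rfl
    rw [← hset, List.singleton_append]
    congr 1
    apply List.map_congr_left
    intro k hk
    have hkne : (k == head) = false := by
      rw [hset] at hk
      have := (PySem.Set.mem_discard (s := PySem.Set.ofList tl) (x := head) (y := k)).mp hk
      simpa using this.2
    have hkne' : k ≠ head := by simpa using hkne
    have hcount : (head :: tl).count k = rest2.count k := by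
      rw [hrest2, List.count_filter (by simp [hkne'])]
      simp [Ne.symm hkne']
    rw [hcount]

-- ===== VERDICT (by name: the statement is the Claim_ definition above) =====
theorem get_ngrams_freqDist_spec : Claim_equal_get_ngrams_freqDist := by
  intro ngramList n _
  unfold Spec_get_ngrams_freqDist get_ngrams_freqDist get_ngrams_freqDist_alt
  have hstep : (fun (d : PySem.Dict String Int) (ngram : String) =>
      if d.contains ngram then d.insert ngram (d.getD ngram 0 + 1)
      else d.insert ngram 1)
      = fun d ngram => d.insert ngram (d.getD ngram 0 + 1) := by
    funext d ngram; exact pvStep_eq d ngram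
  rw [hstep, PySem.Dict.foldl_insert_getD_add_one_eq_counter, PySem.Dict.items_counter]
  rw [pvFreqLoop_items_aux ngramList.length ngramList PySem.Dict.empty le_rfl
      (fun g _ => PySem.Dict.contains_empty g)]
  simp [PySem.Dict.empty]
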